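-- pv_equiv track=rewrite | github.com/keroger2k/impact | clients/panorama.py | resolve_service
-- ===== SOURCE A (Python) =====
-- def resolve_service(
--     name:    str,
--     svc_obj: dict[str, list[tuple[str, str]]],
--     svc_grp: dict[str, list[str]],
--     visited: set | None = None,
-- ) -> list[tuple[str, str]]:
--     """Recursively expand a service name to [(protocol, port_str), ...]."""
--     if visited is None:
--         visited = set()
--     if name in visited:
--         return []
--     visited.add(name)
--
--     if name in svc_obj:
--         return list(svc_obj[name])
--     if name in svc_grp:
--         result = []
--         for member in svc_grp[name]:
--             result.extend(resolve_service(member, svc_obj, svc_grp, visited))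
--         return result
--     return []
-- ===== SOURCE B (Python) =====
-- def resolve_service(
--     name,
--     svc_obj,
--     svc_grp,
--     visited=None,
-- ):
--     """Iteratively expand a service name to [(protocol, port_str), ...] with an
--     explicit DFS stack (mark-on-pop), instead of recursion."""
--     if visited is None:
--         visited = set()
--     stack = [name]
--     result = []
--     while stack:
--         cur = stack.pop()
--         if cur in visited:
--             continue
--         visited.add(cur)
--         if cur in svc_obj:
--             result.extend(svc_obj[cur])
--         elif cur in svc_grp:
--             stack.extend(reversed(svc_grp[cur]))
--     return result
-- ===== Notes on version B (the rewrite author's own statement) =====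
-- stated objective: alternative
-- what changed: Replaces the recursive expansion with an iterative depth-first search using an explicit stack (mark-on-pop, members pushed in reverse), removing recursion while keeping the exact output order and the same mutation of the shared visited set.
import Mathlib
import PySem

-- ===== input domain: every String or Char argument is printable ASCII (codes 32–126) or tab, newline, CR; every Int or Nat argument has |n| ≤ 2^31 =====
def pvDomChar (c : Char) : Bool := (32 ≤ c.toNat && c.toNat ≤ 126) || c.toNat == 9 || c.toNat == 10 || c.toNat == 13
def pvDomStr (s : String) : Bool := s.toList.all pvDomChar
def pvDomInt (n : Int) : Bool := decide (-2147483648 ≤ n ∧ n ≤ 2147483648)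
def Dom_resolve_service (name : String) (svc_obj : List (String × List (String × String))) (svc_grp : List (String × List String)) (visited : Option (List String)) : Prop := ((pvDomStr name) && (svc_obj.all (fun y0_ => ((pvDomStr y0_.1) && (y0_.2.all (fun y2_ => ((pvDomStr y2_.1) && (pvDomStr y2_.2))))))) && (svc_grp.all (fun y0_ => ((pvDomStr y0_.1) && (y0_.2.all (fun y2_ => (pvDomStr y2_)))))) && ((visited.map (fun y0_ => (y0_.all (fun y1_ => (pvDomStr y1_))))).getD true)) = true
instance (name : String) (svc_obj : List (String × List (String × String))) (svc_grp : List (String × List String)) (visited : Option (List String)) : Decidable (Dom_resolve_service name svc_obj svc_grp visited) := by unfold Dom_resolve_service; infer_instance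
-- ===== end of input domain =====

-- B replaces A's recursion by an iterative DFS with an explicit stack (mark-on-pop,
-- members pushed in reverse): an alternative decomposition with the same cost.
-- Both A and B mutate the caller's `visited` set identically; the theorems below are
-- about the RETURN value (the `visited` set is threaded explicitly in the ports).

-- ===== PORT A =====
-- fuel is only a totality guard for Lean's termination checker; `pvFuel` is proved
-- sufficient below, so the guard branches are never taken in the claims.
def pvFuel (svc_grp : List (String × List String)) : Nat :=
  (svc_grp.flatMap Prod.snd).length + 2

mutual
-- the recursive body of A; `vis` is Python's mutated `visited` set, threaded through
def resolveA (so : List (String × List (String × String))) (sg : List (String × List String)) :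
    Nat → String → PySem.Set String → (List (String × String) × PySem.Set String)
  | fuel, name, vis =>
    if PySem.Set.contains vis name then ([], vis)
    else
      let vis' := PySem.Set.add vis name
      match (PySem.Dict.mk so).get? name with
      | some l => (l, vis')
      | none =>
        match (PySem.Dict.mk sg).get? name with
        | some ms =>
          match fuel with
          | 0 => ([], vis')          -- fuel guard (unreachable at pvFuel)
          | f + 1 => resolveAList so sg f ms vis'
        | none => ([], vis')
  termination_by fuel _ _ => (fuel, 0)

-- A's `for member in svc_grp[name]: result.extend(...)` loop
def resolveAList (so : List (String × List (String × String))) (sg : List (String × List String)) :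
    Nat → List String → PySem.Set String → (List (String × String) × PySem.Set String)
  | _, [], vis => ([], vis)
  | f, m :: ms, vis =>
    let p := resolveA so sg f m vis
    let q := resolveAList so sg f ms p.2
    (p.1 ++ q.1, q.2)
  termination_by f ms _ => (f, ms.length + 1)
end

def resolve_service (name : String) (svc_obj : List (String × List (String × String))) (svc_grp : List (String × List String)) (visited : Option (List String)) : List (String × String) :=
  (resolveA svc_obj svc_grp (pvFuel svc_grp) name (PySem.Set.ofList (visited.getD []))).1

-- ===== PORT B =====
-- B's while loop; the stack is modelled top-first, so Python's
-- `stack.extend(reversed(svc_grp[cur]))` followed by `stack.pop()` is `ms ++ rest`.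
def loopB (so : List (String × List (String × String))) (sg : List (String × List String)) :
    Nat → List String → PySem.Set String → List (String × String)
  | _, [], _ => []
  | fuel, c :: rest, vis =>
    if PySem.Set.contains vis c then loopB so sg fuel rest vis
    else
      let vis' := PySem.Set.add vis c
      match (PySem.Dict.mk so).get? c with
      | some l => l ++ loopB so sg fuel rest vis'
      | none =>
        match (PySem.Dict.mk sg).get? c with
        | some ms =>
          match fuel with
          | 0 => []                  -- fuel guard (unreachable at pvFuel)
          | f + 1 => loopB so sg f (ms ++ rest) vis'
        | none => loopB so sg fuel rest vis'
termination_by fuel stack _ => (fuel, stack.length)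

def resolve_service_alt (name : String) (svc_obj : List (String × List (String × String))) (svc_grp : List (String × List String)) (visited : Option (List String)) : List (String × String) :=
  loopB svc_obj svc_grp (pvFuel svc_grp) [name] (PySem.Set.ofList (visited.getD []))

-- ===== PRECONDITION & SPEC =====
def Spec_resolve_service (name : String) (svc_obj : List (String × List (String × String))) (svc_grp : List (String × List String)) (visited : Option (List String)) (out : List (String × String)) : Prop := out = resolve_service_alt name svc_obj svc_grp visited
instance (name : String) (svc_obj : List (String × List (String × String))) (svc_grp : List (String × List String)) (visited : Option (List String)) (out : List (String × String)) : Decidable (Spec_resolve_service name svc_obj svc_grp visited out) := by unfold Spec_resolve_service; infer_instance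

-- ===== CLAIM (what is proved, stated in full; the proofs are below) =====
def Claim_equal_resolve_service : Prop := ∀ (name : String) (svc_obj : List (String × List (String × String))) (svc_grp : List (String × List String)) (visited : Option (List String)), Dom_resolve_service name svc_obj svc_grp visited → Spec_resolve_service name svc_obj svc_grp visited (resolve_service name svc_obj svc_grp visited)

-- ===== LEMMAS AND PROOFS =====

-- the universe of names ever pushed/recursed into beyond the initial one
def pvU (sg : List (String × List String)) : List String := sg.flatMap Prod.snd

-- number of universe names not yet visited: the fuel measure
def pvRem (sg : List (String × List String)) (vis : PySem.Set String) : Nat :=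
  ((pvU sg).filter (fun u => !(decide (u ∈ vis)))).length

theorem pvRem_le (sg : List (String × List String)) (vis : PySem.Set String) :
    pvRem sg vis ≤ (pvU sg).length :=
  List.length_filter_le _ _

theorem filt_le (v v' : List String) (h : ∀ x, x ∈ v → x ∈ v') (us : List String) :
    (us.filter (fun u => !(decide (u ∈ v')))).length
      ≤ (us.filter (fun u => !(decide (u ∈ v)))).length := by
  induction us with
  | nil => simp
  | cons u rest ih =>
    simp only [List.filter_cons]
    by_cases hu : u ∈ v
    · simp [hu, h _ hu]; exact ih
    · by_cases hu' : u ∈ v'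
      · simp [hu, hu']; omega
      · simp [hu, hu']; exact ih

theorem filt_lt (v v' : List String) (n : String) (h : ∀ x, x ∈ v → x ∈ v')
    (hnv : n ∉ v) (hn : n ∈ v') (us : List String) (hus : n ∈ us) :
    (us.filter (fun u => !(decide (u ∈ v')))).length
      < (us.filter (fun u => !(decide (u ∈ v)))).length := by
  induction us with
  | nil => cases hus
  | cons u rest ih =>
    simp only [List.filter_cons]
    rcases List.mem_cons.mp hus with rfl | hrest
    · simp [hn, hnv]
      have := filt_le v v' h rest
      omega
    · by_cases hu : u ∈ v
      · simp [hu, h _ hu]; exact ih hrest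
      · by_cases hu' : u ∈ v'
        · simp [hu, hu']
          have := filt_le v v' h rest
          omega
        · simp [hu, hu']; exact ih hrest

theorem pvRem_mono (sg : List (String × List String)) (v v' : PySem.Set String)
    (h : ∀ x, x ∈ v → x ∈ v') : pvRem sg v' ≤ pvRem sg v :=
  filt_le v v' h (pvU sg)

theorem pvRem_strict (sg : List (String × List String)) (v v' : PySem.Set String)
    (n : String) (hnU : n ∈ pvU sg) (hnv : n ∉ v)
    (h : ∀ x, x ∈ v → x ∈ v') (hn : n ∈ v') : pvRem sg v' < pvRem sg v :=
  filt_lt v v' n h hnv hn (pvU sg) hnU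

theorem mem_add_self (s : PySem.Set String) (x : String) : x ∈ PySem.Set.add s x := by
  exact (PySem.Set.mem_add s x x).mpr (Or.inr rfl)

theorem mem_add_of_mem (s : PySem.Set String) (x y : String) (hy : y ∈ s) :
    y ∈ PySem.Set.add s x :=
  (PySem.Set.mem_add s x y).mpr (Or.inl hy)

-- visited only grows through A's recursion
theorem growA (so : List (String × List (String × String))) (sg : List (String × List String)) :
    ∀ (f : Nat),
    (∀ n vis x, x ∈ vis → x ∈ (resolveA so sg f n vis).2) ∧
    (∀ ms vis x, x ∈ vis → x ∈ (resolveAList so sg f ms vis).2) := by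
  intro f
  induction f with
  | zero =>
    have hA : ∀ n vis x, x ∈ vis → x ∈ (resolveA so sg 0 n vis).2 := by
      intro n vis x hx
      rw [resolveA]
      split
      · exact hx
      · cases h1 : (PySem.Dict.mk so).get? n with
        | some l => simp [h1]; exact Or.inl hx
        | none =>
          cases h2 : (PySem.Dict.mk sg).get? n with
          | some ms => simp [h1, h2]; exact Or.inl hx
          | none => simp [h1, h2]; exact Or.inl hx
    refine ⟨hA, ?_⟩
    intro ms
    induction ms with
    | nil => intro vis x hx; rw [resolveAList]; exact hx
    | cons m ms ihm =>
      intro vis x hx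
      rw [resolveAList]
      exact ihm _ _ (hA _ _ _ hx)
  | succ f ih =>
    have hA : ∀ n vis x, x ∈ vis → x ∈ (resolveA so sg (f+1) n vis).2 := by
      intro n vis x hx
      rw [resolveA]
      split
      · exact hx
      · cases h1 : (PySem.Dict.mk so).get? n with
        | some l => simp [h1]; exact Or.inl hx
        | none =>
          cases h2 : (PySem.Dict.mk sg).get? n with
          | some ms =>
            simp [h1, h2]
            exact ih.2 _ _ _ (mem_add_of_mem _ _ _ hx)
          | none => simp [h1, h2]; exact Or.inl hx
    refine ⟨hA, ?_⟩
    intro ms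
    induction ms with
    | nil => intro vis x hx; rw [resolveAList]; exact hx
    | cons m ms ihm =>
      intro vis x hx
      rw [resolveAList]
      exact ihm _ _ (hA _ _ _ hx)

-- a value found by dict lookup is one of the dict's values
theorem get?_mk_mem : ∀ (sg : List (String × List String)) (c : String) (ms : List String),
    (PySem.Dict.mk sg).get? c = some ms → ms ∈ sg.map Prod.snd := by
  intro sg
  induction sg with
  | nil =>
    intro c ms h
    rw [show (PySem.Dict.mk ([] : List (String × List String))).get? c = none from rfl] at h
    cases h
  | cons p rest ih =>
    intro c ms h
    rw [PySem.Dict.get?_mk_cons] at h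
    by_cases he : p.1 == c
    · simp [he] at h
      simp [← h]
    · simp [he] at h
      simp only [List.map_cons, List.mem_cons]
      exact Or.inr (ih c ms h)

theorem mem_pvU_of_get? (sg : List (String × List String)) (c : String) (ms : List String)
    (h : (PySem.Dict.mk sg).get? c = some ms) : ∀ x ∈ ms, x ∈ pvU sg := by
  intro x hx
  obtain ⟨p, hp, hms⟩ := List.mem_map.mp (get?_mk_mem sg c ms h)
  exact List.mem_flatMap.mpr ⟨p, hp, by rw [hms]; exact hx⟩

-- loopB does not depend on the fuel once the fuel dominates the measure
theorem Birr (so : List (String × List (String × String))) (sg : List (String × List String)) :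
    ∀ (f1 f2 : Nat) (stack : List String) (vis : PySem.Set String),
    (∀ c ∈ stack, c ∈ pvU sg) → pvRem sg vis ≤ f1 → pvRem sg vis ≤ f2 →
    loopB so sg f1 stack vis = loopB so sg f2 stack vis := by
  intro f1
  induction f1 with
  | zero =>
    intro f2 stack
    induction stack with
    | nil => intro vis _ _ _; rw [loopB, loopB]
    | cons c rest ihs =>
      intro vis hst h1 h2
      rw [loopB]
      by_cases hc : c ∈ vis
      · simp [PySem.Set.contains, List.contains_iff_mem, hc]
        rw [ihs vis (fun x hx => hst x (List.mem_cons_of_mem _ hx)) h1 h2]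
        conv_rhs => rw [loopB]
        simp [PySem.Set.contains, List.contains_iff_mem, hc]
      · exfalso
        have hcU : c ∈ pvU sg := hst c (List.mem_cons_self ..)
        have : 0 < pvRem sg vis := by
          unfold pvRem
          have : c ∈ (pvU sg).filter (fun u => !(decide (u ∈ vis))) := by
            simp [List.mem_filter, hcU, hc]
          exact List.length_pos_of_mem this
        omega
  | succ f1 ihf =>
    intro f2 stack
    induction stack with
    | nil => intro vis _ _ _; rw [loopB, loopB]
    | cons c rest ihs =>
      intro vis hst h1 h2
      have hrest : ∀ x ∈ rest, x ∈ pvU sg := fun x hx => hst x (List.mem_cons_of_mem _ hx)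
      rw [loopB]
      conv_rhs => rw [loopB]
      by_cases hc : c ∈ vis
      · simp only [PySem.Set.contains, List.contains_iff_mem, hc, if_pos, decide_true]
        exact ihs vis hrest h1 h2
      · have hcU : c ∈ pvU sg := hst c (List.mem_cons_self ..)
        have hpos : 0 < pvRem sg vis := by
          unfold pvRem
          have : c ∈ (pvU sg).filter (fun u => !(decide (u ∈ vis))) := by
            simp [List.mem_filter, hcU, hc]
          exact List.length_pos_of_mem this
        have hcb : PySem.Set.contains vis c = false := by
          simp [PySem.Set.contains, List.contains_iff_mem, hc]
        simp only [hcb, Bool.false_eq_true, if_false]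
        have hgrow : ∀ x ∈ vis, x ∈ PySem.Set.add vis c := fun x hx => mem_add_of_mem _ _ _ hx
        have hdec : pvRem sg (PySem.Set.add vis c) < pvRem sg vis :=
          pvRem_strict sg vis _ c hcU hc hgrow (mem_add_self _ _)
        cases h1' : (PySem.Dict.mk so).get? c with
        | some l =>
          simp only [h1']
          rw [ihs (PySem.Set.add vis c) hrest (by omega) (by omega)]
        | none =>
          cases h2' : (PySem.Dict.mk sg).get? c with
          | some ms =>
            simp only [h1', h2']
            obtain ⟨g2, rfl⟩ : ∃ g2, f2 = g2 + 1 := by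
              cases f2 with
              | zero => omega
              | succ g2 => exact ⟨g2, rfl⟩
            have hms : ∀ x ∈ ms ++ rest, x ∈ pvU sg := by
              intro x hx
              rcases List.mem_append.mp hx with hx | hx
              · exact mem_pvU_of_get? sg c ms h2' x hx
              · exact hrest x hx
            exact ihf g2 (ms ++ rest) (PySem.Set.add vis c) hms (by omega) (by omega)
          | none =>
            simp only [h1', h2']
            rw [ihs (PySem.Set.add vis c) hrest (by omega) (by omega)]

theorem MAIN (so : List (String × List (String × String))) (sg : List (String × List String)) :
    ∀ (f : Nat) (name : String) (vis : PySem.Set String) (stack : List String),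
    ((name ∈ pvU sg → pvRem sg vis + 1 ≤ f) ∧ (name ∉ pvU sg → pvRem sg vis + 2 ≤ f)) →
    (∀ c ∈ stack, c ∈ pvU sg) →
    loopB so sg f (name :: stack) vis
      = (resolveA so sg f name vis).1 ++ loopB so sg f stack (resolveA so sg f name vis).2 := by
  intro f
  induction f with
  | zero =>
    intro name vis stack h _
    exfalso
    by_cases hU : name ∈ pvU sg
    · have := h.1 hU; omega
    · have := h.2 hU; omega
  | succ f ihf =>
    intro name vis stack h hstack
    obtain ⟨hin, hout⟩ := h
    rw [loopB]
    conv_rhs => rw [resolveA]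
    by_cases hc : name ∈ vis
    · have hcb : PySem.Set.contains vis name = true := by
        simp [PySem.Set.contains, List.contains_iff_mem, hc]
      simp only [hcb, if_true]
      simp
    · have hcb : PySem.Set.contains vis name = false := by
        simp [PySem.Set.contains, List.contains_iff_mem, hc]
      simp only [hcb, Bool.false_eq_true, if_false]
      have hgrow : ∀ x ∈ vis, x ∈ PySem.Set.add vis name :=
        fun x hx => mem_add_of_mem _ _ _ hx
      cases h1 : (PySem.Dict.mk so).get? name with
      | some l => simp only [h1]
      | none =>
        cases h2 : (PySem.Dict.mk sg).get? name with
        | none => simp only [h1, h2]; simp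
        | some ms =>
          simp only [h1, h2]
          -- bound for the expanded visited set
          have hv' : pvRem sg (PySem.Set.add vis name) + 1 ≤ f := by
            by_cases hU : name ∈ pvU sg
            · have hdec : pvRem sg (PySem.Set.add vis name) < pvRem sg vis :=
                pvRem_strict sg vis _ name hU hc hgrow (mem_add_self _ _)
              have := hin hU
              omega
            · have hmono : pvRem sg (PySem.Set.add vis name) ≤ pvRem sg vis :=
                pvRem_mono sg vis _ hgrow
              have := hout hU
              omega
          have hmsU : ∀ m ∈ ms, m ∈ pvU sg := mem_pvU_of_get? sg name ms h2
          -- the fold lemma: the stack loop runs A's member loop in order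
          have FOLD : ∀ (ms' : List String), (∀ m ∈ ms', m ∈ pvU sg) →
              ∀ (stack' : List String) (w : PySem.Set String),
              (∀ c ∈ stack', c ∈ pvU sg) → pvRem sg w + 1 ≤ f →
              loopB so sg f (ms' ++ stack') w
                = (resolveAList so sg f ms' w).1
                    ++ loopB so sg f stack' (resolveAList so sg f ms' w).2 := by
            intro ms'
            induction ms' with
            | nil => intro _ stack' w _ _; rw [resolveAList]; simp
            | cons m ms' ihm =>
              intro hm stack' w hs hw
              have hmU : m ∈ pvU sg := hm m (List.mem_cons_self ..)
              have hms' : ∀ x ∈ ms', x ∈ pvU sg := fun x hx => hm x (List.mem_cons_of_mem _ hx)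
              have hstep := ihf m w (ms' ++ stack')
                ⟨fun _ => hw, fun hn => absurd hmU hn⟩
                (by intro x hx
                    rcases List.mem_append.mp hx with hx | hx
                    · exact hms' x hx
                    · exact hs x hx)
              rw [List.cons_append, hstep]
              have hw2 : pvRem sg (resolveA so sg f m w).2 + 1 ≤ f := by
                have hsub : ∀ x ∈ w, x ∈ (resolveA so sg f m w).2 :=
                  fun x hx => (growA so sg f).1 m w x hx
                have := pvRem_mono sg w _ hsub
                omega
              rw [ihm hms' stack' (resolveA so sg f m w).2 hs hw2]
              rw [resolveAList]
              simp [List.append_assoc]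
          rw [FOLD ms hmsU stack (PySem.Set.add vis name) hstack hv']
          -- lift the tail from fuel f back to fuel f+1
          have hsub : ∀ x ∈ PySem.Set.add vis name,
              x ∈ (resolveAList so sg f ms (PySem.Set.add vis name)).2 :=
            fun x hx => (growA so sg f).2 ms _ x hx
          have hrem : pvRem sg (resolveAList so sg f ms (PySem.Set.add vis name)).2
              ≤ pvRem sg (PySem.Set.add vis name) := pvRem_mono sg _ _ hsub
          rw [Birr so sg f (f + 1) stack (resolveAList so sg f ms (PySem.Set.add vis name)).2
              hstack (by omega) (by omega)]

-- ===== VERDICT (by name: the statement is the Claim_ definition above) =====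
theorem resolve_service_spec : Claim_equal_resolve_service := by
  intro name so sg visited _
  unfold Spec_resolve_service resolve_service resolve_service_alt
  have h := MAIN so sg (pvFuel sg) name (PySem.Set.ofList (visited.getD [])) []
    (by
      constructor <;> intro _ <;>
        · have := pvRem_le sg (PySem.Set.ofList (visited.getD []))
          unfold pvFuel pvU at *
          omega)
    (by intro c hc; cases hc)
  rw [h]
  rw [loopB]
  simp
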